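-- pv_equiv track=rewrite | github.com/Jinkyun0328/CodingTestPython | SAVE/Elevator/Elevator1.py | solution
-- ===== SOURCE A (Python) =====
-- def solution(storey):
--     answer = 0
--
--     while storey > 0:
--         digit = storey % 10
--         if digit >= 6:
--             storey += (10 - digit)
--             answer += (10 - digit)
--         elif digit == 5:
--             if (storey // 10)%10 >= 5:
--                 storey += (10 - digit)
--                 answer += (10 - digit)
--             else:
--                 storey -= digit
--                 answer += digit
--         else:
--             storey -= digit
--             answer += digit
--
--         storey = storey // 10
--
--     return answer
-- ===== SOURCE B (Python) =====
-- def solution(storey):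
--     # digit DP with carry: for each decimal digit keep the min cost with and
--     # without an incoming carry, processed from the most significant digit down
--     digits = []
--     s = storey
--     while s > 0:
--         digits.append(s % 10)
--         s //= 10
--     a0, a1 = 0, 1
--     for d in reversed(digits):
--         a0, a1 = min(d + a0, (10 - d) + a1), min((d + 1) + a0, (9 - d) + a1)
--     return a0
-- ===== Notes on version B (the rewrite author's own statement) =====
-- stated objective: alternative
-- what changed: Replaces A's greedy per-digit loop (with its digit==5 look-ahead tie-break) by a two-state dynamic program over the decimal digits: for each digit, the minimum cost with and without an incoming carry, folded from the most significant digit down.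
import Mathlib
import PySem

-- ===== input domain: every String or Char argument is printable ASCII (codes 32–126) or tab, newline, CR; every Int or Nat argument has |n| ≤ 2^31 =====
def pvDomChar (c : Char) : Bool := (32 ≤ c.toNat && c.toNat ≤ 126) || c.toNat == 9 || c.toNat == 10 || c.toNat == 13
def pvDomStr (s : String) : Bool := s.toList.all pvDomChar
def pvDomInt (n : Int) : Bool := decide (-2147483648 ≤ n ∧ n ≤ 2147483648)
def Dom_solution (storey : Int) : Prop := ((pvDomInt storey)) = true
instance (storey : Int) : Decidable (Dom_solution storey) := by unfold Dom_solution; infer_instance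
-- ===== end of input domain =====

-- B replaces A's greedy per-digit loop (with the digit==5 next-digit tie-break) by a
-- two-state digit DP over the decimal digits (min cost with / without an incoming carry);
-- alternative decomposition, same linear cost.

-- ===== PORT A =====
-- literal port of A's while-loop as a fuel recursion over (storey, answer);
-- fuel = storey.toNat + 1 only makes the loop total (storey strictly decreases each pass)
def solutionGo (fuel : Nat) (storey answer : Int) : Int :=
  match fuel with
  | 0 => answer
  | fuel + 1 =>
    if storey > 0 then
      let digit := PySem.Int.mod storey 10
      if digit ≥ 6 then
        solutionGo fuel (PySem.Int.floordiv (storey + (10 - digit)) 10) (answer + (10 - digit))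
      else if digit = 5 then
        if PySem.Int.mod (PySem.Int.floordiv storey 10) 10 ≥ 5 then
          solutionGo fuel (PySem.Int.floordiv (storey + (10 - digit)) 10) (answer + (10 - digit))
        else
          solutionGo fuel (PySem.Int.floordiv (storey - digit) 10) (answer + digit)
      else
        solutionGo fuel (PySem.Int.floordiv (storey - digit) 10) (answer + digit)
    else answer

def solution (storey : Int) : Int := solutionGo (storey.toNat + 1) storey 0

-- ===== PORT B =====
-- B's digit-extraction loop (append storey % 10; storey //= 10), same fuel pattern
def toDigitsB (fuel : Nat) (s : Int) : List Int :=
  match fuel with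
  | 0 => []
  | fuel + 1 =>
    if s > 0 then PySem.Int.mod s 10 :: toDigitsB fuel (PySem.Int.floordiv s 10) else []

-- B's loop body, updating the pair of carry-state costs
def stepB (p : Int × Int) (d : Int) : Int × Int :=
  (min (d + p.1) ((10 - d) + p.2), min ((d + 1) + p.1) ((9 - d) + p.2))

def solution_alt (storey : Int) : Int :=
  ((toDigitsB (storey.toNat + 1) storey).reverse.foldl stepB (0, 1)).1

-- ===== PRECONDITION & SPEC =====
def Spec_solution (storey : Int) (out : Int) : Prop := out = solution_alt storey
instance (storey : Int) (out : Int) : Decidable (Spec_solution storey out) := by unfold Spec_solution; infer_instance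

-- ===== CLAIM (what is proved, stated in full; the proofs are below) =====
def Claim_equal_solution : Prop := ∀ (storey : Int), Dom_solution storey → Spec_solution storey (solution storey)

-- ===== LEMMAS AND PROOFS =====

lemma modE (a : Int) : PySem.Int.mod a 10 = a % 10 :=
  PySem.Int.mod_eq_emod_of_pos (by norm_num)

lemma divE (a : Int) : PySem.Int.floordiv a 10 = a / 10 :=
  PySem.Int.floordiv_eq_ediv_of_pos (by norm_num)

-- canonical digit list (fuel instantiated once and for all)
def digitsOf (s : Int) : List Int := toDigitsB (s.toNat + 1) s

lemma toDigitsB_fuel : ∀ (f1 : Nat) (s : Int), s.toNat < f1 → ∀ (f2 : Nat), s.toNat < f2 →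
    toDigitsB f1 s = toDigitsB f2 s := by
  intro f1
  induction f1 with
  | zero => intro s h1; omega
  | succ f1 ih =>
    intro s h1 f2 h2
    match f2, h2 with
    | f2 + 1, h2 =>
      simp only [toDigitsB]
      by_cases hs : s > 0
      · rw [if_pos hs, if_pos hs, divE,
          ih (s / 10) (by omega) f2 (by omega)]
      · rw [if_neg hs, if_neg hs]

lemma digitsOf_nonpos {s : Int} (h : ¬ s > 0) : digitsOf s = [] := by
  unfold digitsOf toDigitsB
  rw [if_neg h]

lemma digitsOf_pos {s : Int} (h : s > 0) : digitsOf s = (s % 10) :: digitsOf (s / 10) := by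
  unfold digitsOf
  conv_lhs => rw [toDigitsB]
  rw [if_pos h, modE, divE, toDigitsB_fuel s.toNat (s / 10) (by omega) ((s / 10).toNat + 1) (by omega)]

-- functional form of B's DP: G ds c = min cost for the digit list ds (LSB first) with incoming carry c
def G : List Int → Int → Int
  | [], c => c
  | d :: r, c => min ((d + c) + G r 0) ((10 - (d + c)) + G r 1)

lemma foldl_rev (ds : List Int) : ds.reverse.foldl stepB (0, 1) = (G ds 0, G ds 1) := by
  induction ds with
  | nil => simp [G]
  | cons d t ih =>
    simp only [List.reverse_cons, List.foldl_append, ih, List.foldl_cons, List.foldl_nil, stepB, G]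
    rw [Prod.ext_iff]
    constructor <;> (simp only []; omega)

lemma G_bound (ds : List Int) : G ds 0 ≤ G ds 1 + 1 ∧ G ds 1 ≤ G ds 0 + 1 := by
  cases ds with
  | nil => simp [G]
  | cons d r => simp only [G]; omega

lemma G_head_le {e : Int} (r : List Int) (h : e ≤ 4) : G (e :: r) 0 ≤ G (e :: r) 1 := by
  have hb := G_bound r
  simp only [G]; omega

lemma G_head_ge {e : Int} (r : List Int) (h : 5 ≤ e) : G (e :: r) 1 ≤ G (e :: r) 0 := by
  have hb := G_bound r
  simp only [G]; omega

lemma G_carry : ∀ (n : Nat) (s : Int), 0 ≤ s → s.toNat ≤ n →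
    G (digitsOf (s + 1)) 0 = G (digitsOf s) 1 := by
  intro n
  induction n with
  | zero =>
    intro s h0 hn
    have hs : s = 0 := by omega
    subst hs
    have h1 : digitsOf (0 + 1 : Int) = [1] := by
      rw [digitsOf_pos (by norm_num)]
      norm_num [digitsOf_nonpos]
    rw [h1, digitsOf_nonpos (by norm_num)]
    simp [G]
  | succ n ih =>
    intro s h0 hn
    by_cases hs : s = 0
    · subst hs
      have h1 : digitsOf (0 + 1 : Int) = [1] := by
        rw [digitsOf_pos (by norm_num)]
        norm_num [digitsOf_nonpos]
      rw [h1, digitsOf_nonpos (by norm_num)]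
      simp [G]
    · have hpos : s > 0 := by omega
      rw [digitsOf_pos hpos]
      by_cases he : s % 10 ≤ 8
      · have h10 : (s + 1) % 10 = s % 10 + 1 := by omega
        have hd10 : (s + 1) / 10 = s / 10 := by omega
        rw [digitsOf_pos (by omega), h10, hd10]
        simp only [G]
        omega
      · -- last digit is 9: the carry propagates
        have he9 : s % 10 = 9 := by omega
        have h10 : (s + 1) % 10 = 0 := by omega
        have hd10 : (s + 1) / 10 = s / 10 + 1 := by omega
        rw [digitsOf_pos (by omega), h10, hd10]
        have ihb := ih (s / 10) (by omega) (by omega)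
        have hb1 := G_bound (digitsOf (s / 10 + 1))
        have hbb := G_bound (digitsOf (s / 10))
        simp only [G, he9]
        omega

lemma solutionGo_eq : ∀ (fuel : Nat) (s ans : Int), s.toNat < fuel →
    solutionGo fuel s ans = ans + G (digitsOf s) 0 := by
  intro fuel
  induction fuel with
  | zero => intro s ans hn; omega
  | succ n ih =>
    intro s ans hn
    by_cases hs : s > 0
    · simp only [solutionGo]
      rw [if_pos hs]
      simp only [modE, divE]
      have hbq := G_bound (digitsOf (s / 10))
      by_cases h6 : s % 10 ≥ 6
      · rw [if_pos h6]
        have harg : (s + (10 - s % 10)) / 10 = s / 10 + 1 := by omega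
        rw [harg, ih _ _ (by omega), G_carry n (s / 10) (by omega) (by omega),
          digitsOf_pos hs]
        simp only [G]
        omega
      · rw [if_neg h6]
        by_cases h5 : s % 10 = 5
        · rw [if_pos h5]
          by_cases hnext : (s / 10) % 10 ≥ 5
          · rw [if_pos hnext]
            have harg : (s + (10 - s % 10)) / 10 = s / 10 + 1 := by omega
            rw [harg, ih _ _ (by omega), G_carry n (s / 10) (by omega) (by omega),
              digitsOf_pos hs]
            have hqpos : s / 10 > 0 := by omega
            have hge := G_head_ge (digitsOf (s / 10 / 10)) hnext
            rw [digitsOf_pos hqpos] at *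
            simp only [G, h5] at *
            omega
          · rw [if_neg hnext]
            have harg : (s - s % 10) / 10 = s / 10 := by omega
            rw [harg, ih _ _ (by omega), digitsOf_pos hs]
            by_cases hqz : s / 10 > 0
            · have hle := G_head_le (digitsOf (s / 10 / 10)) (by omega : (s / 10) % 10 ≤ 4)
              rw [digitsOf_pos hqz] at *
              simp only [G, h5] at *
              omega
            · rw [digitsOf_nonpos hqz]
              simp only [G, h5]
              omega
        · rw [if_neg h5]
          have harg : (s - s % 10) / 10 = s / 10 := by omega
          rw [harg, ih _ _ (by omega), digitsOf_pos hs]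
          simp only [G]
          omega
    · simp only [solutionGo]
      rw [if_neg hs, digitsOf_nonpos hs]
      simp [G]

lemma solution_alt_eq (s : Int) : solution_alt s = G (digitsOf s) 0 := by
  unfold solution_alt
  rw [show toDigitsB (s.toNat + 1) s = digitsOf s from rfl, foldl_rev]

-- ===== VERDICT (by name: the statement is the Claim_ definition above) =====
theorem solution_spec : Claim_equal_solution := by
  intro s _
  unfold Spec_solution solution
  rw [solution_alt_eq, solutionGo_eq (s.toNat + 1) s 0 (by omega)]
  omega
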